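-- pv_equiv track=rewrite | github.com/Lyndakhazem/Forme-Normale-grammaire-algebrique | structure.py | extraire_symboles_de_production
-- ===== SOURCE A (Python) =====
-- def extraire_symboles_de_production(prod):
--     '''
--     Découpe une production en symboles (terminaux et non-terminaux).
--     Exemple : "aA1B2" sera découpé en ["a","A1", "B2"]
--     prod: La production à découper (chaîne de caractères).
--     return Liste des symboles separer dans l'ordre .
--     '''
--     symbols = []
--     i = 0
--     while i < len(prod):
--         if prod[i].isupper() and i + 1 < len(prod) and prod[i+1].isdigit():  # Non-terminal
--             symbols.append(prod[i:i+2])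
--             i += 2  # On saute ces deux caractères
--         else:
--             symbols.append(prod[i])  # Ajouter un terminal compris E
--             i += 1
--     return symbols
-- ===== SOURCE B (Python) =====
-- def extraire_symboles_de_production(prod):
--     # State machine folded over the characters (no index arithmetic, no slicing):
--     # hold at most one pending uppercase letter; a digit arriving merges with it
--     # into a non-terminal, anything else flushes it as a terminal.
--     symbols = []
--     pending = None
--     for c in prod:
--         if pending is not None:
--             if c.isdigit():
--                 symbols.append(pending + c)
--                 pending = None
--                 continue
--             symbols.append(pending)
--             pending = None
--         if c.isupper():
--             pending = c
--         else:
--             symbols.append(c)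
--     if pending is not None:
--         symbols.append(pending)
--     return symbols
-- ===== Notes on version B (the rewrite author's own statement) =====
-- stated objective: faster
-- what changed: Replaces A's index loop with per-step bounds checks and string slicing by a single character-by-character state machine that holds at most one pending uppercase letter, merging it with a following digit or flushing it as a terminal; no indices or slices at all.
import Mathlib
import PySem

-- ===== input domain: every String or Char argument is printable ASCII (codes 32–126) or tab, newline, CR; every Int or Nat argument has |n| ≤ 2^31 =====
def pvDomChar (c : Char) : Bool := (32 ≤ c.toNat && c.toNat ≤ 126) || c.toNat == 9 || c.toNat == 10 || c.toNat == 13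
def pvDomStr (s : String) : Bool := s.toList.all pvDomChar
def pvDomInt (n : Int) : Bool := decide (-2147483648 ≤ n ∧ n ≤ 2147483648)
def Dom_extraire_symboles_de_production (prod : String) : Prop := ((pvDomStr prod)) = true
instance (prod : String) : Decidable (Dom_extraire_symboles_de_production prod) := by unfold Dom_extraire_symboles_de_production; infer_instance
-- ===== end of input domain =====

-- B replaces A's index loop (bounds checks + slicing) by a character-by-character state
-- machine holding at most one pending uppercase letter (return value only; no mutation).

-- ===== PORT A =====
-- A's while loop over the index i with the accumulating `symbols` list; prod[i] and
-- prod[i+1] are only read under the bounds guards, so List.getD is exact there.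
def pvGoA (cs : List Char) (i : Nat) (symbols : List String) : List String :=
  if i < cs.length then
    if PySem.Chars.isupper (cs.getD i ' ') && decide (i + 1 < cs.length)
        && PySem.Chars.isdigit (cs.getD (i+1) ' ') then
      pvGoA cs (i + 2) (symbols ++ [String.ofList (PySem.List.slice cs (some (i:Int)) (some ((i:Int)+2)))])
    else
      pvGoA cs (i + 1) (symbols ++ [String.ofList [cs.getD i ' ']])
  else symbols
termination_by cs.length - i

def extraire_symboles_de_production (prod : String) : List String :=
  pvGoA prod.toList 0 []

-- ===== PORT B =====
-- B's loop body: one step of the state machine; the state is (symbols, pending).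
def pvStepB (st : List String × Option Char) (c : Char) : List String × Option Char :=
  match st with
  | (symbols, some u) =>
    if PySem.Chars.isdigit c then (symbols ++ [String.ofList [u, c]], none)
    else if PySem.Chars.isupper c then (symbols ++ [String.ofList [u]], some c)
    else (symbols ++ [String.ofList [u], String.ofList [c]], none)
  | (symbols, none) =>
    if PySem.Chars.isupper c then (symbols, some c)
    else (symbols ++ [String.ofList [c]], none)

-- B's final `if pending is not None: symbols.append(pending)`.
def pvFlushB : List String × Option Char → List String
  | (symbols, some u) => symbols ++ [String.ofList [u]]
  | (symbols, none) => symbols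

def extraire_symboles_de_production_alt (prod : String) : List String :=
  pvFlushB (prod.toList.foldl pvStepB ([], none))

-- ===== PRECONDITION & SPEC =====
def Spec_extraire_symboles_de_production (prod : String) (out : List String) : Prop := out = extraire_symboles_de_production_alt prod
instance (prod : String) (out : List String) : Decidable (Spec_extraire_symboles_de_production prod out) := by unfold Spec_extraire_symboles_de_production; infer_instance

-- ===== CLAIM (what is proved, stated in full; the proofs are below) =====
def Claim_equal_extraire_symboles_de_production : Prop := ∀ (prod : String), Dom_extraire_symboles_de_production prod → Spec_extraire_symboles_de_production prod (extraire_symboles_de_production prod)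

-- ===== LEMMAS AND PROOFS =====

-- Reference tokenization, structurally recursive on the char list: an uppercase letter
-- immediately followed by a digit forms one two-char token, otherwise one char per token.
def pvTok : List Char → List String
  | [] => []
  | [a] => [String.ofList [a]]
  | a :: b :: t =>
    if PySem.Chars.isupper a && PySem.Chars.isdigit b then
      String.ofList [a, b] :: pvTok t
    else
      String.ofList [a] :: pvTok (b :: t)

theorem pvTok_cons_not (c : Char) (t : List Char)
    (h : ∀ b, t.head? = some b → (PySem.Chars.isupper c && PySem.Chars.isdigit b) = false) :
    pvTok (c :: t) = String.ofList [c] :: pvTok t := by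
  cases t with
  | nil => rfl
  | cons b t' => simp [pvTok, h b rfl]

-- A's loop computes the reference tokenization of the unread suffix.
theorem pvGoA_eq (cs : List Char) (i : Nat) (syms : List String) :
    pvGoA cs i syms = syms ++ pvTok (cs.drop i) := by
  refine pvGoA.induct cs (fun i syms => pvGoA cs i syms = syms ++ pvTok (cs.drop i)) ?_ ?_ ?_ i syms
  · intro i syms hlt hcond ih
    rw [pvGoA, if_pos hlt, if_pos hcond, ih]
    simp only [Bool.and_eq_true, decide_eq_true_eq] at hcond
    obtain ⟨⟨hu, h1⟩, hd⟩ := hcond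
    rw [List.drop_eq_getElem_cons hlt, List.drop_eq_getElem_cons h1]
    rw [pvTok, if_pos (by
      rw [List.getD_eq_getElem cs ' ' hlt] at hu
      rw [List.getD_eq_getElem cs ' ' h1] at hd
      simp [hu, hd])]
    have hslice : PySem.List.slice cs (some (i:Int)) (some ((i:Int)+2)) = [cs[i], cs[i+1]] := by
      have : ((i:Int)+2) = ((i+2 : Nat) : Int) := by push_cast; ring
      rw [this, PySem.List.slice_natCast]
      rw [List.drop_eq_getElem_cons hlt, List.drop_eq_getElem_cons h1,
        show i + 2 - i = 2 from by omega, List.take_succ_cons, List.take_succ_cons, List.take_zero]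
    rw [hslice]
    simp
  · intro i syms hlt hcond ih
    rw [pvGoA, if_pos hlt, if_neg hcond, ih]
    rw [List.getD_eq_getElem cs ' ' hlt]
    by_cases h1 : i + 1 < cs.length
    · rw [List.drop_eq_getElem_cons hlt, List.drop_eq_getElem_cons h1]
      rw [pvTok, if_neg (by
        rw [List.getD_eq_getElem cs ' ' hlt] at hcond
        rw [List.getD_eq_getElem cs ' ' h1] at hcond
        simp only [Bool.and_eq_true, decide_eq_true_eq] at hcond
        intro hc
        simp only [Bool.and_eq_true] at hc
        exact hcond ⟨⟨hc.1, h1⟩, hc.2⟩)]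
      rw [← List.drop_eq_getElem_cons h1]
      simp
    · rw [List.drop_eq_getElem_cons hlt, List.drop_of_length_le (l := cs) (by omega)]
      simp [pvTok]
  · intro i syms hge
    rw [pvGoA, if_neg hge]
    rw [List.drop_of_length_le (by omega)]
    simp [pvTok]

-- B's fold computes the reference tokenization of the pending letter (if any)
-- followed by the remaining characters.
theorem pvFoldB_eq (cs : List Char) : ∀ (acc : List String) (p : Option Char),
    (∀ u, p = some u → PySem.Chars.isupper u = true) →
    pvFlushB (cs.foldl pvStepB (acc, p)) = acc ++ pvTok (p.toList ++ cs) := by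
  induction cs with
  | nil =>
    intro acc p hp
    cases p with
    | none => simp [pvFlushB, pvTok]
    | some u => simp [pvFlushB, pvTok]
  | cons c t ih =>
    intro acc p hp
    cases p with
    | none =>
      simp only [List.foldl_cons, Option.toList_none, List.nil_append]
      by_cases hc : PySem.Chars.isupper c = true
      · rw [show pvStepB (acc, none) c = (acc, some c) from by simp [pvStepB, hc]]
        rw [ih acc (some c) (by intro u h; cases h; exact hc)]
        rfl
      · rw [show pvStepB (acc, none) c = (acc ++ [String.ofList [c]], none) from by
          simp [pvStepB, hc]]
        rw [ih _ none (by intro u h; cases h)]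
        rw [pvTok_cons_not c t (by
          intro b _
          simp [Bool.eq_false_iff.mpr hc])]
        simp
    | some u =>
      have hu : PySem.Chars.isupper u = true := hp u rfl
      simp only [List.foldl_cons, Option.toList_some, List.cons_append, List.nil_append]
      by_cases hd : PySem.Chars.isdigit c = true
      · rw [show pvStepB (acc, some u) c = (acc ++ [String.ofList [u, c]], none) from by
          simp [pvStepB, hd]]
        rw [ih _ none (by intro v h; cases h)]
        rw [pvTok, if_pos (by simp [hu, hd])]
        simp
      · by_cases hc : PySem.Chars.isupper c = true
        · rw [show pvStepB (acc, some u) c = (acc ++ [String.ofList [u]], some c) from by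
            simp [pvStepB, hd, hc]]
          rw [ih _ (some c) (by intro v h; cases h; exact hc)]
          rw [pvTok, if_neg (by simp [hd])]
          simp
        · rw [show pvStepB (acc, some u) c =
              (acc ++ [String.ofList [u], String.ofList [c]], none) from by
            simp [pvStepB, hd, hc]]
          rw [ih _ none (by intro v h; cases h)]
          rw [pvTok, if_neg (by simp [hd])]
          rw [pvTok_cons_not c t (by
            intro b _
            simp [Bool.eq_false_iff.mpr hc])]
          simp

-- ===== VERDICT (by name: the statement is the Claim_ definition above) =====
theorem extraire_symboles_de_production_spec : Claim_equal_extraire_symboles_de_production := by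
  intro prod _
  unfold Spec_extraire_symboles_de_production
  unfold extraire_symboles_de_production extraire_symboles_de_production_alt
  rw [pvGoA_eq, pvFoldB_eq _ _ none (by intro u h; cases h)]
  simp
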